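-- pv_equiv track=rewrite | github.com/doobidoo/dokuwiki2markdown | src/converters/tables.py | _split_into_blocks
-- ===== SOURCE A (Python) =====
-- from typing import List
--
-- def _split_into_blocks(content: str) -> List[str]:
--     """Split content into table and non-table blocks."""
--     blocks = []
--     current_block = []
--     lines = content.split('\n')
--     in_table = False
--
--     for line in lines:
--         is_table_line = line.strip().startswith('^') or line.strip().startswith('|')
--
--         if is_table_line != in_table:
--             if current_block:
--                 blocks.append('\n'.join(current_block))
--                 current_block = []
--             in_table = is_table_line
--
--         current_block.append(line)
--
--     if current_block:
--         blocks.append('\n'.join(current_block))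
--
--     return blocks
-- ===== SOURCE B (Python) =====
-- from typing import List
--
-- def _split_into_blocks(content: str) -> List[str]:
--     """Split content into table and non-table blocks.
--
--     Builds the result back-to-front: fold over the lines in reverse, merging each
--     line into the front block (same kind) or starting a new front block, so there
--     is no in_table flag, no list-of-lines buffer and no end-of-loop flush."""
--     blocks: List[tuple] = []
--     for line in reversed(content.split('\n')):
--         key = line.strip().startswith(('^', '|'))
--         if blocks and blocks[0][0] == key:
--             blocks[0] = (key, line + '\n' + blocks[0][1])
--         else:
--             blocks.insert(0, (key, line))
--     return [text for _, text in blocks]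
-- ===== Notes on version B (the rewrite author's own statement) =====
-- stated objective: alternative
-- what changed: Instead of A's forward state machine with an in_table flag, a list-of-lines buffer and an end-of-loop flush, B folds over the lines in reverse and builds the block list back-to-front, merging each line directly into the front block's string (or starting a new front block) keyed by the block's kind, with no flag, no buffer and no join.
import Mathlib
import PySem

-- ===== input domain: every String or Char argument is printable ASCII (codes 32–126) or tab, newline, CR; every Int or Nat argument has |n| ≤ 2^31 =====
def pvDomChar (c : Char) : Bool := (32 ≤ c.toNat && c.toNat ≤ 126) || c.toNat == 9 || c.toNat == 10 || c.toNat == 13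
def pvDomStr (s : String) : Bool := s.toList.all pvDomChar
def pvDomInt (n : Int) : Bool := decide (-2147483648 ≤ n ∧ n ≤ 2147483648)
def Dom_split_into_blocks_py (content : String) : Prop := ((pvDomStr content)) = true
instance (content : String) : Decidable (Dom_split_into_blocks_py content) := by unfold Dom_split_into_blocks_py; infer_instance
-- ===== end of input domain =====

-- B builds the block list back-to-front: a fold over the lines in reverse that either merges
-- the line into the front block (same kind) or starts a new front block — no in_table flag,
-- no list-of-lines buffer, no end-of-loop flush (alternative decomposition, same cost).

-- ===== PORT A =====
-- is_table_line = line.strip().startswith('^') or line.strip().startswith('|')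
def pvIsTableLine (line : String) : Bool :=
  PySem.Str.startswith (PySem.Str.strip line) "^" || PySem.Str.startswith (PySem.Str.strip line) "|"

-- the for-loop of A, state = (blocks, current_block, in_table)
def pvLoopA : List String → List String → List String → Bool → List String
  | [], blocks, cur, _ =>
      -- end-of-loop flush: if current_block: blocks.append('\n'.join(current_block))
      if cur ≠ [] then blocks ++ [PySem.Str.join "\n" cur] else blocks
  | line :: rest, blocks, cur, t =>
      if pvIsTableLine line ≠ t then
        pvLoopA rest (if cur ≠ [] then blocks ++ [PySem.Str.join "\n" cur] else blocks) [line]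
          (pvIsTableLine line)
      else
        pvLoopA rest blocks (cur ++ [line]) t

def split_into_blocks_py (content : String) : List String :=
  pvLoopA ((PySem.Str.split? content "\n").getD []) [] [] false   -- sep "\n" ≠ "", so split? is always some

-- ===== PORT B =====
-- key = line.strip().startswith(('^', '|')): the same predicate as A's (a tuple argument to
-- startswith is the or of the two startswith), so B reuses the helper pvIsTableLine

-- Python 'a + b' on str: concatenation of the character sequences (exact)
def pvCat (a b : String) : String := String.ofList (a.toList ++ b.toList)

-- one iteration of B's loop over reversed(lines): blocks is the list built so far,
-- 'blocks[0] = (key, line + "\n" + blocks[0][1])' merges into the front block,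
-- 'blocks.insert(0, (key, line))' starts a new front block
def pvStepB (line : String) (blocks : List (Bool × String)) : List (Bool × String) :=
  let key := pvIsTableLine line
  match blocks with
  | (b, s) :: rest =>
      if b = key then (key, pvCat line (pvCat "\n" s)) :: rest
      else (key, line) :: (b, s) :: rest
  | [] => [(key, line)]

def split_into_blocks_py_alt (content : String) : List String :=
  -- 'for line in reversed(lines)' prepending/merging at the front is exactly a right fold
  ((((PySem.Str.split? content "\n").getD []).foldr pvStepB []).map Prod.snd)

-- ===== PRECONDITION & SPEC =====
def Spec_split_into_blocks_py (content : String) (out : List String) : Prop := out = split_into_blocks_py_alt content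
instance (content : String) (out : List String) : Decidable (Spec_split_into_blocks_py content out) := by unfold Spec_split_into_blocks_py; infer_instance

-- ===== CLAIM (what is proved, stated in full; the proofs are below) =====
def Claim_equal_split_into_blocks_py : Prop := ∀ (content : String), Dom_split_into_blocks_py content → Spec_split_into_blocks_py content (split_into_blocks_py content)

-- ===== LEMMAS AND PROOFS =====

-- proof-only intermediate: the maximal runs of lines with equal pvIsTableLine key
def pvGroupBy : List String → List (List String)
  | [] => []
  | [x] => [[x]]
  | x :: y :: rest =>
      match pvGroupBy (y :: rest) with
      | [] => [[x]]
      | g :: gs => if pvIsTableLine x = pvIsTableLine y then (x :: g) :: gs else [x] :: g :: gs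

theorem pvGroupBy_cons_cons (x y : String) (ys : List String) :
    pvGroupBy (x :: y :: ys) =
      match pvGroupBy (y :: ys) with
      | [] => [[x]]
      | g :: gs => if pvIsTableLine x = pvIsTableLine y then (x :: g) :: gs else [x] :: g :: gs :=
  rfl

-- every group produced by pvGroupBy on x :: xs starts with x
theorem pvGroupBy_shape (xs : List String) : ∀ (x : String), ∃ g gs, pvGroupBy (x :: xs) = (x :: g) :: gs := by
  induction xs with
  | nil => intro x; exact ⟨[], [], rfl⟩
  | cons y ys ih =>
      intro x
      obtain ⟨g, gs, hg⟩ := ih y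
      rw [pvGroupBy_cons_cons, hg]
      by_cases h : pvIsTableLine x = pvIsTableLine y
      · exact ⟨y :: g, gs, by simp [h]⟩
      · exact ⟨[], (y :: g) :: gs, by simp [h]⟩

-- ---- A-side: pvLoopA produces the joined groups ----

-- merge a pending current_block (with flag t) into the group list of the remaining lines
def pvMerge (cur : List String) (t : Bool) : List (List String) → List (List String)
  | [] => [cur]
  | g :: gs => if pvIsTableLine g.headI = t then (cur ++ g) :: gs else cur :: g :: gs

-- key x = t: appending x to the current block commutes with merging
theorem pvMerge_eq_of_key (cur : List String) (t : Bool) (x : String) (xs : List String)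
    (hx : pvIsTableLine x = t) :
    pvMerge cur t (pvGroupBy (x :: xs)) = pvMerge (cur ++ [x]) t (pvGroupBy xs) := by
  cases xs with
  | nil => simp [pvGroupBy, pvMerge, hx]
  | cons y ys =>
      obtain ⟨g, gs, hg⟩ := pvGroupBy_shape ys y
      rw [pvGroupBy_cons_cons, hg]
      by_cases hxy : pvIsTableLine x = pvIsTableLine y
      · have hy : pvIsTableLine y = t := hxy ▸ hx
        simp [pvMerge, hxy, hy]
      · have hy : ¬ pvIsTableLine y = t := fun h => hxy (hx.trans h.symm)
        simp [pvMerge, hx, hy, Ne.symm hy]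

-- key x ≠ t: the current block is flushed and a fresh block [x] starts
theorem pvMerge_ne_of_key (cur : List String) (t : Bool) (x : String) (xs : List String)
    (hx : ¬ pvIsTableLine x = t) :
    pvMerge cur t (pvGroupBy (x :: xs)) = cur :: pvMerge [x] (pvIsTableLine x) (pvGroupBy xs) := by
  cases xs with
  | nil => simp [pvGroupBy, pvMerge, hx]
  | cons y ys =>
      obtain ⟨g, gs, hg⟩ := pvGroupBy_shape ys y
      rw [pvGroupBy_cons_cons, hg]
      by_cases hxy : pvIsTableLine x = pvIsTableLine y
      · have hy : ¬ pvIsTableLine y = t := fun h => hx (hxy.trans h)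
        simp [pvMerge, hxy, hy]
      · simp [pvMerge, hxy, hx, Ne.symm hxy]

theorem pvLoopA_eq (ls : List String) : ∀ (blocks cur : List String) (t : Bool), cur ≠ [] →
    pvLoopA ls blocks cur t = blocks ++ (pvMerge cur t (pvGroupBy ls)).map (PySem.Str.join "\n") := by
  induction ls with
  | nil => intro blocks cur t hc; simp [pvLoopA, hc, pvMerge, pvGroupBy]
  | cons x xs ih =>
      intro blocks cur t hc
      by_cases hx : pvIsTableLine x = t
      · rw [pvLoopA]
        simp only [hx, ne_eq, not_true_eq_false, if_false]
        rw [ih blocks (cur ++ [x]) t (by simp), pvMerge_eq_of_key cur t x xs hx]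
      · rw [pvLoopA]
        simp only [hx, ne_eq, not_false_eq_true, if_pos, hc]
        rw [ih (blocks ++ [PySem.Str.join "\n" cur]) [x] (pvIsTableLine x) (by simp),
          pvMerge_ne_of_key cur t x xs hx, List.append_assoc]
        simp [List.map_cons]

theorem pvMerge_single (x : String) (xs : List String) :
    pvMerge [x] (pvIsTableLine x) (pvGroupBy xs) = pvGroupBy (x :: xs) := by
  cases xs with
  | nil => simp [pvGroupBy, pvMerge]
  | cons y ys =>
      obtain ⟨g, gs, hg⟩ := pvGroupBy_shape ys y
      rw [pvGroupBy_cons_cons, hg]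
      by_cases hxy : pvIsTableLine x = pvIsTableLine y
      · simp [pvMerge, hxy]
      · simp [pvMerge, hxy, Ne.symm hxy]

-- ---- B-side: the reverse fold produces the joined groups, each tagged with its key ----

theorem pvJoin_singleton (x : String) : PySem.Str.join "\n" [x] = x := by
  rw [String.ext_iff]
  simp only [PySem.Str.toList_join, List.map_cons, List.map_nil, PySem.Chars.join_singleton]

theorem pvCat_join (x y : String) (g : List String) :
    pvCat x (pvCat "\n" (PySem.Str.join "\n" (y :: g))) = PySem.Str.join "\n" (x :: y :: g) := by
  rw [String.ext_iff]
  simp only [pvCat, String.toList_ofList, PySem.Str.toList_join, List.map_cons,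
    PySem.Chars.join_cons_cons]
  simp

theorem pvFoldrB_eq (ls : List String) :
    ls.foldr pvStepB [] =
      (pvGroupBy ls).map (fun g => (pvIsTableLine g.headI, PySem.Str.join "\n" g)) := by
  induction ls with
  | nil => rfl
  | cons x xs ih =>
      cases xs with
      | nil => simp [pvGroupBy, pvStepB, pvJoin_singleton]
      | cons y ys =>
          obtain ⟨g, gs, hg⟩ := pvGroupBy_shape ys y
          rw [List.foldr_cons, ih, hg, pvGroupBy_cons_cons, hg]
          by_cases hxy : pvIsTableLine x = pvIsTableLine y
          · simp [pvStepB, hxy, pvCat_join]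
          · have hyx : ¬ pvIsTableLine y = pvIsTableLine x := fun h => hxy h.symm
            simp [pvStepB, hxy, hyx, pvJoin_singleton]

-- ===== VERDICT (by name: the statement is the Claim_ definition above) =====
theorem split_into_blocks_py_spec : Claim_equal_split_into_blocks_py := by
  intro content _
  unfold Spec_split_into_blocks_py split_into_blocks_py split_into_blocks_py_alt
  rw [pvFoldrB_eq]
  cases h : (PySem.Str.split? content "\n").getD [] with
  | nil => simp [pvLoopA, pvGroupBy]
  | cons x xs =>
      have step : pvLoopA (x :: xs) [] [] false = pvLoopA xs [] [x] (pvIsTableLine x) := by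
        by_cases hx : pvIsTableLine x = false
        · rw [pvLoopA]; simp [hx]
        · rw [pvLoopA]; simp [hx]
      rw [step, pvLoopA_eq xs [] [x] (pvIsTableLine x) (by simp), pvMerge_single]
      simp [List.map_map, Function.comp]
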